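-- pv_equiv track=rewrite | github.com/yuankailiu/utils | sarut/tools/math.py | networking
-- ===== SOURCE A (Python) =====
-- def networking(friends, sortbylen=True):
--     # person's friendship circle (network) is a person themselves
--     # plus friendship circles of all their direct friends
--     # minus already seen people
--     # https://stackoverflow.com/questions/15331877/creating-dictionaries-of-friends-that-know-other-friends-in-python
--     def friends_graph(people_all, friends):
--         # graph of friends (adjacency lists representation)
--         G = {p: [] for p in people_all} # person -> direct friends list
--         for friend in friends:
--             for p in friend:
--                 f_list = list(friend)
--                 f_list.remove(p)
--                 G[p].extend(f_list)
--         return G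
--
--     def friendship_circle(person): # a.k.a. connected component
--         seen.add(person)
--         yield person
--         for friend in direct_friends[person]:
--             if friend not in seen:
--                 yield from friendship_circle(friend)
--
--     people_all = list(set(sum(friends, [])))
--     direct_friends = friends_graph(people_all, friends)
--     seen = set() # already seen people
--
--     # group people into friendship circles
--     circs = (friendship_circle(p) for p in people_all if p not in seen)
--
--     # convert generator to a list with sublist(s)
--     circ_lists = []
--     for circ in circs:
--         member = sorted(list(circ))
--         circ_lists.append(member)
--
--     if sortbylen:
--         circ_lists.sort(key=len, reverse=True)
--
--     return circ_lists
-- ===== SOURCE B (Python) =====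
-- def networking(friends, sortbylen=True):
--     # merge-overlapping-groups algorithm: no adjacency graph, no recursion.
--     # For each yet-unseen person, saturate their component by repeatedly
--     # absorbing every group that overlaps it, until a full pass changes nothing.
--     people = list(dict.fromkeys(x for g in friends for x in g))
--     out = []
--     emitted = set()
--     for p in people:
--         if p in emitted:
--             continue
--         comp = {p}
--         changed = True
--         while changed:
--             changed = False
--             for g in friends:
--                 if not comp.issuperset(g) and not comp.isdisjoint(g):
--                     comp.update(g)
--                     changed = True
--         out.append(sorted(comp))
--         emitted.update(comp)
--     if sortbylen:
--         out.sort(key=len, reverse=True)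
--     return out
-- ===== Notes on version B (the rewrite author's own statement) =====
-- stated objective: faster
-- what changed: Replaced A's quadratic sum()-based flattening plus adjacency-graph construction and recursive-generator DFS with a graph-free component saturation: for each yet-unseen person, repeatedly absorb every friend group overlapping the growing component until a full pass over the groups changes nothing.
import Mathlib
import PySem

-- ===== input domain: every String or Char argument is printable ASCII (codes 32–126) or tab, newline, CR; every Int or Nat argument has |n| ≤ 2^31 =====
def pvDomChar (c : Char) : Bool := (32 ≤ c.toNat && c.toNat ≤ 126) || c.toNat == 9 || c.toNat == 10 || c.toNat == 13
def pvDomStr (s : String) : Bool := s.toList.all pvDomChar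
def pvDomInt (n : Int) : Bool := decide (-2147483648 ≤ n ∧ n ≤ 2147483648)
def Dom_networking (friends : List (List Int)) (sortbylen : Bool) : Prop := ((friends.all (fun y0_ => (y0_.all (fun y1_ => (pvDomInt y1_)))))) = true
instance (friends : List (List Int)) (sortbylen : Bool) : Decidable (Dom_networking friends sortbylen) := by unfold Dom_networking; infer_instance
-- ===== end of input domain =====

-- ===== PORT A =====
-- One honest line: B replaces A's quadratic sum()-based flattening, adjacency graph and
-- recursive-generator DFS by graph-free saturation of each component over the groups; the timing
-- run measured B faster at the largest sizes.
-- A's 'list(set(...))' is ported as PySem.Set.ofList (first-occurrence order; CPython's hash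
-- iteration order is not modelled — the declared output comparison for this task is as a set).

-- G = {p: [] for p in people_all}; then G[p].extend(f_list) per occurrence of p in each group.
-- 'G[p].extend(..)' is Dict.modify: exact here since every p of a group is a key of G (KeyError unreachable).
def friendsGraph (people_all : List Int) (friends : List (List Int)) : PySem.Dict Int (List Int) :=
  let G0 := people_all.foldl (fun d p => d.insert p ([] : List Int)) PySem.Dict.empty
  friends.foldl (fun d friend =>
    friend.foldl (fun d p =>
      -- f_list = list(friend); f_list.remove(p) — p ∈ friend, so remove? is exact (ValueError unreachable)
      let f_list := (PySem.List.remove? friend p).getD friend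
      d.modify p [] (· ++ f_list)) d) G0

-- friendship_circle: the recursive generator, with the `seen` set threaded through; the Nat
-- argument is a fuel guard for totality only (people_all.length + 1 suffices, proved below).
mutual
def dfsVisit (G : PySem.Dict Int (List Int)) : Nat → Int → PySem.Set Int → (PySem.Set Int × List Int)
  | 0, _, seen => (seen, [])  -- fuel exhausted: unreachable with the fuel supplied by networking
  | f + 1, p, seen =>
      let r := dfsFriends G f (G.getD p []) (PySem.Set.add seen p)
      (r.1, p :: r.2)
termination_by f _ _ => (f, 0)
def dfsFriends (G : PySem.Dict Int (List Int)) : Nat → List Int → PySem.Set Int → (PySem.Set Int × List Int)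
  | _, [], seen => (seen, [])
  | f, q :: qs, seen =>
      if PySem.Set.contains seen q then dfsFriends G f qs seen
      else
        let r := dfsVisit G f q seen
        let r2 := dfsFriends G f qs r.1
        (r2.1, r.2 ++ r2.2)
termination_by f l _ => (f, l.length + 1)
end

def networking (friends : List (List Int)) (sortbylen : Bool) : List (List Int) :=
  let people_all : List Int := PySem.Set.ofList (friends.foldl (· ++ ·) [])  -- list(set(sum(friends, [])))
  let G := friendsGraph people_all friends
  let fuel := people_all.length + 1
  let r := people_all.foldl (fun (st : PySem.Set Int × List (List Int)) p =>
      if PySem.Set.contains st.1 p then st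
      else
        let v := dfsVisit G fuel p st.1
        (v.1, st.2 ++ [PySem.List.sorted v.2 (fun x => x) false])) (PySem.Set.empty, [])
  if sortbylen then PySem.List.sorted r.2 (fun l => (l.length : Int)) true else r.2

-- ===== PORT B =====
-- one full pass of `for g in friends: if not comp.issuperset(g) and not comp.isdisjoint(g): comp.update(g); changed = True`
def satPass (friends : List (List Int)) (comp : PySem.Set Int) : PySem.Set Int × Bool :=
  friends.foldl (fun (st : PySem.Set Int × Bool) g =>
    if !(PySem.Set.issuperset st.1 g) && !(PySem.Set.isdisjoint st.1 g)
    then (PySem.Set.update st.1 g, true) else st) (comp, false)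

-- `while changed:` — fuel guard for totality only; friends.length + 1 passes always reach a
-- fixed point (each changing pass absorbs at least one further group, proved below).
def satLoop (friends : List (List Int)) : Nat → PySem.Set Int → PySem.Set Int
  | 0, comp => comp
  | f + 1, comp =>
      let r := satPass friends comp
      if r.2 then satLoop friends f r.1 else r.1

def networking_alt (friends : List (List Int)) (sortbylen : Bool) : List (List Int) :=
  let people : List Int := PySem.List.dedup (friends.flatMap (fun g => g))  -- dict.fromkeys(x for g in friends for x in g)
  let r := people.foldl (fun (st : PySem.Set Int × List (List Int)) p =>
      if PySem.Set.contains st.1 p then st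
      else
        let comp := satLoop friends (friends.length + 1) (PySem.Set.add PySem.Set.empty p)
        (PySem.Set.update st.1 comp, st.2 ++ [PySem.List.sorted comp (fun x => x) false])) (PySem.Set.empty, [])
  if sortbylen then PySem.List.sorted r.2 (fun l => (l.length : Int)) true else r.2

-- ===== PRECONDITION & SPEC =====
def Spec_networking (friends : List (List Int)) (sortbylen : Bool) (out : List (List Int)) : Prop := out = networking_alt friends sortbylen
instance (friends : List (List Int)) (sortbylen : Bool) (out : List (List Int)) : Decidable (Spec_networking friends sortbylen out) := by unfold Spec_networking; infer_instance

-- ===== CLAIM (what is proved, stated in full; the proofs are below) =====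
def Claim_equal_networking : Prop := ∀ (friends : List (List Int)) (sortbylen : Bool), Dom_networking friends sortbylen → Spec_networking friends sortbylen (networking friends sortbylen)

-- ===== LEMMAS AND PROOFS =====

-- co-membership in some friend group, and its reflexive-transitive closure (connectivity)
def stepRel (friends : List (List Int)) (x y : Int) : Prop := ∃ g ∈ friends, x ∈ g ∧ y ∈ g

def connRel (friends : List (List Int)) : Int → Int → Prop := Relation.ReflTransGen (stepRel friends)

-- adjacency in A's graph dict
def adjRel (G : PySem.Dict Int (List Int)) (q x : Int) : Prop := x ∈ G.getD q []

theorem connRel_symm {friends : List (List Int)} {a b : Int} (h : connRel friends a b) :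
    connRel friends b a :=
  Relation.ReflTransGen.symmetric (fun _ _ ⟨g, hg, hx, hy⟩ => ⟨g, hg, hy, hx⟩) h

-- a strict version of List.countP_mono_left (one element flips)
theorem pvCountP_lt {α : Type} {l : List α} {p q : α → Bool} (h : ∀ a ∈ l, p a → q a)
    {a : α} (ha : a ∈ l) (hq : q a = true) (hp : p a = false) :
    l.countP p < l.countP q := by
  induction l with
  | nil => cases ha
  | cons b t ih =>
    rcases List.mem_cons.1 ha with rfl | hat
    · have h1 : t.countP p ≤ t.countP q :=
        List.countP_mono_left (fun x hx => h x (List.mem_cons_of_mem _ hx))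
      simp [hp, hq]
      exact h1
    · have h1 := ih (fun x hx => h x (List.mem_cons_of_mem _ hx)) hat
      have h2 : (if p b then 1 else 0) ≤ (if q b then 1 else 0) := by
        by_cases hb : p b = true
        · simp [hb, h b (List.mem_cons_self) hb]
        · simp [Bool.not_eq_true] at hb; simp [hb]
      simp [List.countP_cons]; omega

-- G0 = {p: [] for p in people_all} : every value is []
theorem getD_initGraph (ps : List Int) (d : PySem.Dict Int (List Int))
    (hd : ∀ q, d.getD q [] = []) (q : Int) :
    (ps.foldl (fun d p => d.insert p ([] : List Int)) d).getD q [] = [] := by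
  induction ps generalizing d with
  | nil => exact hd q
  | cons p t ih =>
    refine ih _ (fun r => ?_)
    rw [PySem.Dict.getD_insert]
    split <;> simp [hd]

-- the inner loop `for p in friend: G[p].extend(f_list)` (f_list computed from the fixed g0)
theorem mem_getD_innerFold (elts g0 : List Int) (d : PySem.Dict Int (List Int)) (q x : Int) :
    x ∈ (elts.foldl (fun d p =>
          d.modify p [] (· ++ (PySem.List.remove? g0 p).getD g0)) d).getD q [] ↔
      x ∈ d.getD q [] ∨ (q ∈ elts ∧ x ∈ (PySem.List.remove? g0 q).getD g0) := by
  induction elts generalizing d with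
  | nil => simp
  | cons p t ih =>
    rw [List.foldl_cons, ih]
    rw [PySem.Dict.getD_modify]
    by_cases hqp : q = p
    · subst hqp; simp; tauto
    · simp [hqp]

-- membership in A's adjacency lists: x ∈ G[q] iff q, x share a group (x in the group minus one q)
theorem mem_getD_friendsGraph (people : List Int) (friends : List (List Int)) (q x : Int) :
    x ∈ (friendsGraph people friends).getD q [] ↔ ∃ g ∈ friends, q ∈ g ∧ x ∈ g.erase q := by
  have base : ∀ r, ((people.foldl (fun d p => d.insert p ([] : List Int))
      PySem.Dict.empty)).getD r [] = [] :=
    getD_initGraph people _ (fun r => by simp)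
  have main : ∀ (fs : List (List Int)) (d : PySem.Dict Int (List Int)),
      x ∈ (fs.foldl (fun d friend => friend.foldl (fun d p =>
            d.modify p [] (· ++ (PySem.List.remove? friend p).getD friend)) d) d).getD q [] ↔
        x ∈ d.getD q [] ∨ ∃ g ∈ fs, q ∈ g ∧ x ∈ (PySem.List.remove? g q).getD g := by
    intro fs
    induction fs with
    | nil => simp
    | cons g t ih =>
      intro d
      rw [List.foldl_cons, ih, mem_getD_innerFold]
      simp only [List.mem_cons]
      constructor
      · rintro ((h | h) | ⟨g', hg', hq', hx'⟩)
        · exact Or.inl h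
        · exact Or.inr ⟨g, Or.inl rfl, h.1, h.2⟩
        · exact Or.inr ⟨g', Or.inr hg', hq', hx'⟩
      · rintro (h | ⟨g', (rfl | hg'), hq', hx'⟩)
        · exact Or.inl (Or.inl h)
        · exact Or.inl (Or.inr ⟨hq', hx'⟩)
        · exact Or.inr ⟨g', hg', hq', hx'⟩
  rw [friendsGraph]
  simp only []
  rw [main, base]
  simp only [List.not_mem_nil, false_or]
  constructor
  · rintro ⟨g, hg, hq, hx⟩
    rw [PySem.List.remove?_eq_some_erase _ q hq] at hx
    exact ⟨g, hg, hq, hx⟩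
  · rintro ⟨g, hg, hq, hx⟩
    refine ⟨g, hg, hq, ?_⟩
    rw [PySem.List.remove?_eq_some_erase _ q hq]
    exact hx


-- bridges between A's adjacency relation and group co-membership
theorem adj_imp_step {people : List Int} {friends : List (List Int)} {q x : Int}
    (h : adjRel (friendsGraph people friends) q x) : stepRel friends q x := by
  rw [adjRel, mem_getD_friendsGraph] at h
  obtain ⟨g, hg, hq, hx⟩ := h
  exact ⟨g, hg, hq, List.mem_of_mem_erase hx⟩

theorem step_imp_adj {people : List Int} {friends : List (List Int)} {q x : Int}
    (h : stepRel friends q x) (hne : x ≠ q) : adjRel (friendsGraph people friends) q x := by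
  obtain ⟨g, hg, hq, hx⟩ := h
  rw [adjRel, mem_getD_friendsGraph]
  exact ⟨g, hg, hq, (List.mem_erase_of_ne hne).mpr hx⟩

theorem connAdj_iff_conn (people : List Int) (friends : List (List Int)) (a b : Int) :
    Relation.ReflTransGen (adjRel (friendsGraph people friends)) a b ↔ connRel friends a b := by
  constructor
  · exact Relation.ReflTransGen.mono (fun _ _ h => adj_imp_step h)
  · intro h
    induction h with
    | refl => exact Relation.ReflTransGen.refl
    | tail _ hstep ih =>
      rename_i b c _
      by_cases hbc : c = b
      · exact hbc ▸ ih
      · exact Relation.ReflTransGen.tail ih (step_imp_adj hstep hbc)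

-- Bool-side negative membership
theorem contains_false_not_mem {s : PySem.Set Int} {x : Int}
    (h : PySem.Set.contains s x = false) : x ∉ s := by
  intro hm
  rw [(PySem.Set.contains_iff s x).mpr hm] at h
  cases h

-- number of people not yet seen (the fuel measure for the DFS)
def unseenCnt (P : List Int) (s : PySem.Set Int) : Nat :=
  P.countP (fun x => !PySem.Set.contains s x)

theorem unseenCnt_mono {P : List Int} {s s' : PySem.Set Int} (h : ∀ x, x ∈ s → x ∈ s') :
    unseenCnt P s' ≤ unseenCnt P s := by
  refine List.countP_mono_left (fun x _ hx => ?_)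
  simp only [Bool.not_eq_true'] at hx ⊢
  rcases hc : PySem.Set.contains s x with _ | _
  · rfl
  · exact absurd (h x ((PySem.Set.contains_iff s x).mp hc)) (contains_false_not_mem hx)

theorem unseenCnt_add_lt {P : List Int} {s : PySem.Set Int} {p : Int}
    (hp : p ∈ P) (hns : p ∉ s) : unseenCnt P (PySem.Set.add s p) < unseenCnt P s := by
  refine pvCountP_lt (fun x _ hx => ?_) hp ?_ ?_
  · simp only [Bool.not_eq_true'] at hx ⊢
    rcases hc : PySem.Set.contains s x with _ | _
    · rfl
    · have hmem : x ∈ PySem.Set.add s p :=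
        (PySem.Set.mem_add s p x).mpr (Or.inl ((PySem.Set.contains_iff s x).mp hc))
      exact absurd hmem (contains_false_not_mem hx)
  · simp only [Bool.not_eq_true']
    rcases hc : PySem.Set.contains s p with _ | _
    · rfl
    · exact absurd ((PySem.Set.contains_iff s p).mp hc) hns
  · have hmem : p ∈ PySem.Set.add s p := (PySem.Set.mem_add s p p).mpr (Or.inr rfl)
    simp [hmem]

-- what one DFS call (`friendship_circle`) establishes
def VisitSpec (P : List Int) (G : PySem.Dict Int (List Int)) (p : Int)
    (seen s' : PySem.Set Int) (out : List Int) : Prop :=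
  (∀ x, x ∈ s' ↔ x ∈ seen ∨ x ∈ out) ∧ out.Nodup ∧ (∀ x ∈ out, x ∉ seen) ∧
  (∀ x ∈ out, Relation.ReflTransGen (adjRel G) p x) ∧ p ∈ out ∧
  (∀ q ∈ out, ∀ x, adjRel G q x → x ∈ s') ∧ (∀ x ∈ out, x ∈ P)

def FriendsSpec (P : List Int) (G : PySem.Dict Int (List Int)) (l : List Int)
    (seen s' : PySem.Set Int) (out : List Int) : Prop :=
  (∀ x, x ∈ s' ↔ x ∈ seen ∨ x ∈ out) ∧ out.Nodup ∧ (∀ x ∈ out, x ∉ seen) ∧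
  (∀ x ∈ out, ∃ q ∈ l, Relation.ReflTransGen (adjRel G) q x) ∧ (∀ q ∈ l, q ∈ s') ∧
  (∀ q ∈ out, ∀ x, adjRel G q x → x ∈ s') ∧ (∀ x ∈ out, x ∈ P)

theorem dfs_spec (P : List Int) (G : PySem.Dict Int (List Int))
    (Hadj : ∀ q x, adjRel G q x → x ∈ P) : ∀ f : Nat,
    (∀ p seen, p ∈ P → p ∉ seen → unseenCnt P seen < f →
      VisitSpec P G p seen (dfsVisit G f p seen).1 (dfsVisit G f p seen).2) ∧
    (∀ l seen, (∀ q ∈ l, q ∈ P) → unseenCnt P seen < f →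
      FriendsSpec P G l seen (dfsFriends G f l seen).1 (dfsFriends G f l seen).2) := by
  intro f
  induction f with
  | zero => exact ⟨fun _ _ _ _ h => absurd h (by omega), fun _ _ _ h => absurd h (by omega)⟩
  | succ f ih =>
    have hΦ : ∀ p seen, p ∈ P → p ∉ seen → unseenCnt P seen < f + 1 →
        VisitSpec P G p seen (dfsVisit G (f+1) p seen).1 (dfsVisit G (f+1) p seen).2 := by
      intro p seen hp hns hcnt
      have hu1 : unseenCnt P (PySem.Set.add seen p) < f :=
        Nat.lt_of_lt_of_le (unseenCnt_add_lt hp hns) (by omega)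
      obtain ⟨hm, hnd, hnsn, hsound, hall, hcl, hP⟩ :=
        ih.2 (G.getD p []) (PySem.Set.add seen p) (fun q hq => Hadj p q hq) hu1
      simp only [dfsVisit]
      refine ⟨?_, ?_, ?_, ?_, ?_, ?_, ?_⟩
      · intro x
        rw [hm x, PySem.Set.mem_add]
        simp only [List.mem_cons]
        tauto
      · exact List.Nodup.cons
          (fun hpin => hnsn p hpin ((PySem.Set.mem_add seen p p).mpr (Or.inr rfl))) hnd
      · intro x hx
        rcases List.mem_cons.mp hx with rfl | hx'
        · exact hns
        · exact fun hxs => hnsn x hx' ((PySem.Set.mem_add seen p x).mpr (Or.inl hxs))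
      · intro x hx
        rcases List.mem_cons.mp hx with rfl | hx'
        · exact Relation.ReflTransGen.refl
        · obtain ⟨q, hq, hqx⟩ := hsound x hx'
          exact Relation.ReflTransGen.head hq hqx
      · exact List.mem_cons_self
      · intro q hq x hadj
        rcases List.mem_cons.mp hq with rfl | hq'
        · exact hall x hadj
        · exact hcl q hq' x hadj
      · intro x hx
        rcases List.mem_cons.mp hx with rfl | hx'
        · exact hp
        · exact hP x hx'
    refine ⟨hΦ, ?_⟩
    intro l
    induction l with
    | nil =>
      intro seen _ _
      simp only [dfsFriends]
      exact ⟨fun x => by simp, List.nodup_nil, by simp, by simp, by simp, by simp, by simp⟩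
    | cons q qs ihl =>
      intro seen hql hcnt
      by_cases hqs : q ∈ seen
      · have hc : PySem.Set.contains seen q = true := (PySem.Set.contains_iff seen q).mpr hqs
        obtain ⟨fm, fnd, fns, fsound, fall, fcl, fP⟩ :=
          ihl seen (fun r hr => hql r (List.mem_cons_of_mem _ hr)) hcnt
        simp only [dfsFriends, hc, if_true]
        refine ⟨fm, fnd, fns, ?_, ?_, fcl, fP⟩
        · intro x hx
          obtain ⟨r, hr, hrx⟩ := fsound x hx
          exact ⟨r, List.mem_cons_of_mem _ hr, hrx⟩
        · intro r hr
          rcases List.mem_cons.mp hr with rfl | hr'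
          · exact (fm r).mpr (Or.inl hqs)
          · exact fall r hr'
      · have hc : PySem.Set.contains seen q = false := by
          rcases h : PySem.Set.contains seen q with _ | _
          · rfl
          · exact absurd ((PySem.Set.contains_iff seen q).mp h) hqs
        obtain ⟨vm, vnd, vns, vsound, vqin, vcl, vP⟩ :=
          hΦ q seen (hql q List.mem_cons_self) hqs hcnt
        have hmono : unseenCnt P (dfsVisit G (f+1) q seen).1 < f + 1 :=
          Nat.lt_of_le_of_lt (unseenCnt_mono (fun x hx => (vm x).mpr (Or.inl hx))) hcnt
        obtain ⟨fm, fnd, fns, fsound, fall, fcl, fP⟩ :=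
          ihl (dfsVisit G (f+1) q seen).1 (fun r hr => hql r (List.mem_cons_of_mem _ hr)) hmono
        simp only [dfsFriends, hc, if_false, Bool.false_eq_true]
        refine ⟨?_, ?_, ?_, ?_, ?_, ?_, ?_⟩
        · intro x
          rw [fm x, vm x]
          simp only [List.mem_append]
          tauto
        · refine List.Nodup.append vnd fnd (fun x h1 h2 => ?_)
          exact fns x h2 ((vm x).mpr (Or.inr h1))
        · intro x hx
          rcases List.mem_append.mp hx with hx' | hx'
          · exact vns x hx'
          · exact fun hxs => fns x hx' ((vm x).mpr (Or.inl hxs))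
        · intro x hx
          rcases List.mem_append.mp hx with hx' | hx'
          · exact ⟨q, List.mem_cons_self, vsound x hx'⟩
          · obtain ⟨r, hr, hrx⟩ := fsound x hx'
            exact ⟨r, List.mem_cons_of_mem _ hr, hrx⟩
        · intro r hr
          rcases List.mem_cons.mp hr with rfl | hr'
          · exact (fm r).mpr (Or.inl ((vm r).mpr (Or.inr vqin)))
          · exact fall r hr'
        · intro r hr x hadj
          rcases List.mem_append.mp hr with hr' | hr'
          · exact (fm x).mpr (Or.inl (vcl r hr' x hadj))
          · exact fcl r hr' x hadj
        · intro x hx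
          rcases List.mem_append.mp hx with hx' | hx'
          · exact vP x hx'
          · exact fP x hx'

-- `seen` is a union of whole components
def SeenClosed (friends : List (List Int)) (s : PySem.Set Int) : Prop :=
  ∀ x y, x ∈ s → connRel friends x y → y ∈ s

-- one top-level DFS call collects exactly the connectivity class of its root
theorem visit_component (people : List Int) (friends : List (List Int)) (P : List Int)
    (Hadj : ∀ q x, adjRel (friendsGraph people friends) q x → x ∈ P)
    (p : Int) (seen : PySem.Set Int) (hp : p ∈ P) (hns : p ∉ seen)
    (hinv : SeenClosed friends seen) (f : Nat) (hf : unseenCnt P seen < f) :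
    (∀ x, x ∈ (dfsVisit (friendsGraph people friends) f p seen).2 ↔ connRel friends p x) ∧
    (∀ x, x ∈ (dfsVisit (friendsGraph people friends) f p seen).1 ↔
        x ∈ seen ∨ connRel friends p x) ∧
    (dfsVisit (friendsGraph people friends) f p seen).2.Nodup ∧
    SeenClosed friends (dfsVisit (friendsGraph people friends) f p seen).1 := by
  obtain ⟨hm, hnd, hnsn, hsound, hpin, hcl, hP⟩ :=
    (dfs_spec P (friendsGraph people friends) Hadj f).1 p seen hp hns hf
  have hout : ∀ x, x ∈ (dfsVisit (friendsGraph people friends) f p seen).2 ↔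
      connRel friends p x := by
    intro x
    constructor
    · intro hx
      exact (connAdj_iff_conn people friends p x).mp (hsound x hx)
    · intro hconn
      induction hconn with
      | refl => exact hpin
      | @tail b c hpb hstep ihb =>
        by_cases hcb : c = b
        · exact hcb ▸ ihb
        · have hadj : adjRel (friendsGraph people friends) b c := step_imp_adj hstep hcb
          have hcs := hcl b ihb c hadj
          rcases (hm c).mp hcs with hcseen | hcout
          · exfalso
            have hconn_pc : connRel friends p c := Relation.ReflTransGen.tail hpb hstep
            exact hns (hinv c p hcseen (connRel_symm hconn_pc))
          · exact hcout
  refine ⟨hout, ?_, hnd, ?_⟩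
  · intro x
    rw [hm x, hout x]
  · intro x y hx hconn
    rcases (hm x).mp hx with hxs | hxo
    · exact (hm y).mpr (Or.inl (hinv x y hxs hconn))
    · have : connRel friends p y := Relation.ReflTransGen.trans ((hout x).mp hxo) hconn
      exact (hm y).mpr (Or.inr ((hout y).mpr this))

-- ---------- B side: one pass over the groups ----------

-- growth of the pass fold
theorem passFold_grow (gs : List (List Int)) (st : PySem.Set Int × Bool) (x : Int)
    (hx : x ∈ st.1) :
    x ∈ (gs.foldl (fun st g =>
      if !(PySem.Set.issuperset st.1 g) && !(PySem.Set.isdisjoint st.1 g)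
      then (PySem.Set.update st.1 g, true) else st) st).1 := by
  induction gs generalizing st with
  | nil => exact hx
  | cons g t ih =>
    rw [List.foldl_cons]
    split
    · exact ih _ ((PySem.Set.mem_update st.1 g x).mpr (Or.inl hx))
    · exact ih _ hx

-- every element the pass fold adds is connected to an old element (any closed predicate is preserved)
theorem passFold_sound (friends gs : List (List Int)) (hsub : ∀ g ∈ gs, g ∈ friends)
    (C : Int → Prop) (hC : ∀ g ∈ friends, ∀ w x, w ∈ g → x ∈ g → C w → C x)
    (st : PySem.Set Int × Bool) (hst : ∀ x ∈ st.1, C x) :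
    ∀ x ∈ (gs.foldl (fun st g =>
      if !(PySem.Set.issuperset st.1 g) && !(PySem.Set.isdisjoint st.1 g)
      then (PySem.Set.update st.1 g, true) else st) st).1, C x := by
  induction gs generalizing st with
  | nil => exact hst
  | cons g t ih =>
    rw [List.foldl_cons]
    split
    · rename_i hcond
      refine ih (fun g' hg' => hsub g' (List.mem_cons_of_mem _ hg')) _ (fun x hx => ?_)
      rcases (PySem.Set.mem_update st.1 g x).mp hx with hxo | hxg
      · exact hst x hxo
      · simp only [Bool.and_eq_true, Bool.not_eq_true'] at hcond
        have hov : ∃ w ∈ st.1, w ∈ g := by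
          by_contra hno
          push Not at hno
          have : PySem.Set.isdisjoint st.1 g = true :=
            (PySem.Set.isdisjoint_iff st.1 g).mpr hno
          rw [this] at hcond
          exact absurd hcond.2 (by simp)
        obtain ⟨w, hw, hwg⟩ := hov
        exact hC g (hsub g List.mem_cons_self) w x hwg hxg (hst w hw)
    · exact ih (fun g' hg' => hsub g' (List.mem_cons_of_mem _ hg')) _ hst

-- a pass that reports no change did nothing, and the state is saturated
theorem passFold_false (gs : List (List Int)) (st : PySem.Set Int × Bool)
    (h : (gs.foldl (fun st g =>
      if !(PySem.Set.issuperset st.1 g) && !(PySem.Set.isdisjoint st.1 g)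
      then (PySem.Set.update st.1 g, true) else st) st).2 = false) :
    (gs.foldl (fun st g =>
      if !(PySem.Set.issuperset st.1 g) && !(PySem.Set.isdisjoint st.1 g)
      then (PySem.Set.update st.1 g, true) else st) st).1 = st.1 ∧ st.2 = false ∧
    ∀ g ∈ gs, (∃ x ∈ g, x ∈ st.1) → ∀ y ∈ g, y ∈ st.1 := by
  induction gs generalizing st with
  | nil => exact ⟨rfl, h, by simp⟩
  | cons g t ih =>
    rw [List.foldl_cons] at h ⊢
    rcases hcond : (!(PySem.Set.issuperset st.1 g) && !(PySem.Set.isdisjoint st.1 g)) with _ | _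
    · rw [hcond] at h
      rw [if_neg Bool.false_ne_true] at h ⊢
      obtain ⟨h1, h2, h3⟩ := ih _ h
      refine ⟨h1, h2, ?_⟩
      intro g' hg' hov y hy
      rcases List.mem_cons.mp hg' with rfl | hg''
      · rcases hs : PySem.Set.issuperset st.1 g' with _ | _
        · exfalso
          rw [hs] at hcond
          simp only [Bool.not_false, Bool.true_and, Bool.not_eq_false'] at hcond
          obtain ⟨x, hxg, hxs⟩ := hov
          exact (PySem.Set.isdisjoint_iff st.1 g').mp hcond x hxs hxg
        · exact (PySem.Set.issuperset_iff st.1 g').mp hs y hy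
      · exact h3 g' hg'' hov y hy
    · rw [hcond] at h
      rw [if_pos rfl] at h
      obtain ⟨_, h2, _⟩ := ih _ h
      cases h2

-- a pass that reports a change absorbed some not-yet-absorbed group
theorem passFold_true (gs : List (List Int)) (st : PySem.Set Int × Bool)
    (h : (gs.foldl (fun st g =>
      if !(PySem.Set.issuperset st.1 g) && !(PySem.Set.isdisjoint st.1 g)
      then (PySem.Set.update st.1 g, true) else st) st).2 = true) :
    st.2 = true ∨ ∃ g ∈ gs, (∀ y ∈ g, y ∈ (gs.foldl (fun st g =>
      if !(PySem.Set.issuperset st.1 g) && !(PySem.Set.isdisjoint st.1 g)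
      then (PySem.Set.update st.1 g, true) else st) st).1) ∧ ∃ y ∈ g, y ∉ st.1 := by
  induction gs generalizing st with
  | nil => exact Or.inl h
  | cons g t ih =>
    rw [List.foldl_cons] at h ⊢
    rcases hcond : (!(PySem.Set.issuperset st.1 g) && !(PySem.Set.isdisjoint st.1 g)) with _ | _
    · rw [hcond] at h
      rw [if_neg Bool.false_ne_true] at h ⊢
      rcases ih st h with h' | ⟨g', hg', hsub, y, hyg, hyn⟩
      · exact Or.inl h'
      · exact Or.inr ⟨g', List.mem_cons_of_mem _ hg', hsub, y, hyg, hyn⟩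
    · rw [hcond] at h
      rw [if_pos rfl] at h ⊢
      refine Or.inr ⟨g, List.mem_cons_self, ?_, ?_⟩
      · intro y hy
        exact passFold_grow t _ y ((PySem.Set.mem_update st.1 g y).mpr (Or.inr hy))
      · have hsup : PySem.Set.issuperset st.1 g = false := by
          rcases hs : PySem.Set.issuperset st.1 g with _ | _
          · rfl
          · rw [hs] at hcond; simp at hcond
        by_contra hno
        push Not at hno
        exact absurd ((PySem.Set.issuperset_iff st.1 g).mpr hno) (by simp [hsup])
    
-- the pass fold keeps the component duplicate-free
theorem passFold_nodup (gs : List (List Int)) (st : PySem.Set Int × Bool)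
    (h : st.1.Nodup) :
    (gs.foldl (fun st g =>
      if !(PySem.Set.issuperset st.1 g) && !(PySem.Set.isdisjoint st.1 g)
      then (PySem.Set.update st.1 g, true) else st) st).1.Nodup := by
  induction gs generalizing st with
  | nil => exact h
  | cons g t ih =>
    rw [List.foldl_cons]
    split
    · exact ih _ (PySem.Set.nodup_update st.1 g h)
    · exact ih _ h

-- the while-changed loop reaches a saturated component (friends.length + 1 passes suffice)
theorem satLoop_spec (friends : List (List Int)) : ∀ (f : Nat) (comp : PySem.Set Int),
    friends.countP (fun g => !g.all (fun x => PySem.Set.contains comp x)) < f →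
    (∀ x ∈ comp, x ∈ satLoop friends f comp) ∧
    (∀ (C : Int → Prop), (∀ x ∈ comp, C x) →
      (∀ g ∈ friends, ∀ w x, w ∈ g → x ∈ g → C w → C x) →
      ∀ x ∈ satLoop friends f comp, C x) ∧
    (∀ g ∈ friends, (∃ x ∈ g, x ∈ satLoop friends f comp) →
      ∀ y ∈ g, y ∈ satLoop friends f comp) ∧
    (comp.Nodup → (satLoop friends f comp).Nodup) := by
  intro f
  induction f with
  | zero => exact fun comp h => absurd h (by omega)
  | succ f ih =>
    intro comp hcnt
    rw [satLoop]
    have hpass : satPass friends comp = friends.foldl (fun st g =>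
        if !(PySem.Set.issuperset st.1 g) && !(PySem.Set.isdisjoint st.1 g)
        then (PySem.Set.update st.1 g, true) else st) (comp, false) := rfl
    rcases hr : (satPass friends comp).2 with _ | _
    · -- no change: the pass state is already saturated
      simp only [Bool.false_eq_true, if_false]
      rw [hpass] at hr
      obtain ⟨h1, _, h3⟩ := passFold_false friends (comp, false) hr
      rw [hpass, h1]
      exact ⟨fun x hx => hx, fun C hC _ x hx => hC x hx, h3, fun h => h⟩
    · -- a change: at least one more group is now fully absorbed, so the measure drops
      simp only [if_true]
      rw [hpass] at hr
      rcases passFold_true friends (comp, false) hr with h' | ⟨g0, hg0, hsub0, y0, hy0g, hy0n⟩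
      · cases h'
      · have hgrow : ∀ x ∈ comp, x ∈ (satPass friends comp).1 :=
          fun x hx => passFold_grow friends (comp, false) x hx
        have hlt : friends.countP
            (fun g => !g.all (fun x => PySem.Set.contains (satPass friends comp).1 x)) <
            friends.countP (fun g => !g.all (fun x => PySem.Set.contains comp x)) := by
          refine pvCountP_lt ?_ hg0 ?_ ?_
          · intro g _ hg
            rcases ha : g.all (fun x => PySem.Set.contains comp x) with _ | _
            · simp
            · exfalso
              simp only [Bool.not_eq_true', List.all_eq_false] at hg
              obtain ⟨x, hxg, hxc⟩ := hg
              have hx : x ∈ comp :=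
                (PySem.Set.contains_iff comp x).mp (List.all_eq_true.mp ha x hxg)
              exact hxc ((PySem.Set.contains_iff _ x).mpr (hgrow x hx))
          · simp only [Bool.not_eq_true', List.all_eq_false]
            exact ⟨y0, hy0g, fun hc => hy0n ((PySem.Set.contains_iff comp y0).mp hc)⟩
          · simp only [Bool.not_eq_false', List.all_eq_true]
            intro x hxg
            rw [hpass]
            exact (PySem.Set.contains_iff _ x).mpr (hsub0 x hxg)
        obtain ⟨ih1, ih2, ih3, ih4⟩ := ih (satPass friends comp).1 (by omega)
        refine ⟨?_, ?_, ih3, ?_⟩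
        · exact fun x hx => ih1 x (hgrow x hx)
        · intro C hC hclosed x hx
          refine ih2 C ?_ hclosed x hx
          intro x' hx'
          rw [hpass] at hx'
          exact passFold_sound friends friends (fun g hg => hg) C hclosed (comp, false) hC x' hx'
        · intro hnd
          refine ih4 ?_
          rw [hpass]
          exact passFold_nodup friends (comp, false) hnd

-- B's inner loop collects exactly the connectivity class of its root
theorem sat_component (friends : List (List Int)) (p : Int) :
    (∀ x, x ∈ satLoop friends (friends.length + 1) (PySem.Set.add PySem.Set.empty p) ↔
      connRel friends p x) ∧
    (satLoop friends (friends.length + 1) (PySem.Set.add PySem.Set.empty p)).Nodup := by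
  have hbase : ∀ x, x ∈ PySem.Set.add PySem.Set.empty p ↔ x = p := by
    intro x
    rw [PySem.Set.mem_add]
    simp [PySem.Set.empty]
  obtain ⟨h1, h2, h3, h4⟩ := satLoop_spec friends (friends.length + 1)
    (PySem.Set.add PySem.Set.empty p)
    (by
      have h := List.countP_le_length
        (p := fun g => !g.all (fun x => PySem.Set.contains (PySem.Set.add PySem.Set.empty p) x))
        (l := friends)
      omega)
  refine ⟨fun x => ⟨?_, ?_⟩, ?_⟩
  · intro hx
    refine h2 (connRel friends p) (fun y hy => ?_) (fun g hg w z hw hz hcw => ?_) x hx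
    · rw [hbase y] at hy
      exact hy ▸ Relation.ReflTransGen.refl
    · exact Relation.ReflTransGen.tail hcw ⟨g, hg, hw, hz⟩
  · intro hconn
    induction hconn with
    | refl => exact h1 p ((hbase p).mpr rfl)
    | @tail b c hpb hstep ihb =>
      obtain ⟨g, hg, hbg, hcg⟩ := hstep
      exact h3 g hg ⟨b, hbg, ihb⟩ c hcg
  · exact h4 (by simp [PySem.Set.empty, PySem.Set.add])

-- every adjacency target is one of the people
theorem adj_mem_people (friends : List (List Int)) (q x : Int)
    (h : adjRel (friendsGraph (PySem.Set.ofList (friends.foldl (· ++ ·) [])) friends) q x) :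
    x ∈ PySem.Set.ofList (friends.foldl (· ++ ·) []) := by
  rw [adjRel, mem_getD_friendsGraph] at h
  obtain ⟨g, hg, hq, hx⟩ := h
  rw [PySem.Set.mem_ofList, PySem.List.foldl_append_eq_flatten, List.nil_append]
  exact List.mem_flatten.mpr ⟨g, hg, List.mem_of_mem_erase hx⟩

-- the two outer loops emit the same list of sorted components
theorem outer_eq (friends : List (List Int)) (P : List Int) (G : PySem.Dict Int (List Int))
    (fuel : Nat) (hP : P = PySem.Set.ofList (friends.foldl (· ++ ·) []))
    (hG : G = friendsGraph P friends) (hfuel : fuel = P.length + 1) :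
    ∀ (L : List Int) (sA sB : PySem.Set Int) (o : List (List Int)),
    (∀ q ∈ L, q ∈ P) → (∀ x, x ∈ sA ↔ x ∈ sB) → SeenClosed friends sA →
    (L.foldl (fun (st : PySem.Set Int × List (List Int)) p =>
        if PySem.Set.contains st.1 p then st
        else ((dfsVisit G fuel p st.1).1,
          st.2 ++ [PySem.List.sorted (dfsVisit G fuel p st.1).2 (fun x => x) false]))
      (sA, o)).2 =
    (L.foldl (fun (st : PySem.Set Int × List (List Int)) p =>
        if PySem.Set.contains st.1 p then st
        else (PySem.Set.update st.1
            (satLoop friends (friends.length + 1) (PySem.Set.add PySem.Set.empty p)),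
          st.2 ++ [PySem.List.sorted
            (satLoop friends (friends.length + 1) (PySem.Set.add PySem.Set.empty p))
            (fun x => x) false]))
      (sB, o)).2 := by
  subst hG hfuel hP
  intro L
  induction L with
  | nil => intro sA sB o _ _ _; rfl
  | cons q t ih =>
    intro sA sB o hL hmem hinv
    rw [List.foldl_cons, List.foldl_cons]
    by_cases hq : q ∈ sA
    · have hcA : PySem.Set.contains sA q = true := (PySem.Set.contains_iff sA q).mpr hq
      have hcB : PySem.Set.contains sB q = true :=
        (PySem.Set.contains_iff sB q).mpr ((hmem q).mp hq)
      simp only [hcA, hcB, if_true]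
      exact ih sA sB o (fun r hr => hL r (List.mem_cons_of_mem _ hr)) hmem hinv
    · have hcA : PySem.Set.contains sA q = false := by
        rcases hc : PySem.Set.contains sA q with _ | _
        · rfl
        · exact absurd ((PySem.Set.contains_iff sA q).mp hc) hq
      have hcB : PySem.Set.contains sB q = false := by
        rcases hc : PySem.Set.contains sB q with _ | _
        · rfl
        · exact absurd ((hmem q).mpr ((PySem.Set.contains_iff sB q).mp hc)) hq
      simp only [hcA, hcB, Bool.false_eq_true, if_false]
      have hqP : q ∈ (PySem.Set.ofList (friends.foldl (· ++ ·) []) : List Int) :=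
        hL q List.mem_cons_self
      obtain ⟨houtA, hseenA, hndA, hinvA⟩ :=
        visit_component (PySem.Set.ofList (friends.foldl (· ++ ·) [])) friends
          (PySem.Set.ofList (friends.foldl (· ++ ·) []))
          (fun r x hx => adj_mem_people friends r x hx) q sA hqP hq hinv
          ((PySem.Set.ofList (friends.foldl (· ++ ·) []) : List Int).length + 1)
          (Nat.lt_of_le_of_lt (List.countP_le_length) (Nat.lt_succ_self _))
      obtain ⟨houtB, hndB⟩ := sat_component friends q
      have hperm : (dfsVisit (friendsGraph (PySem.Set.ofList (friends.foldl (· ++ ·) []))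
            friends) ((PySem.Set.ofList (friends.foldl (· ++ ·) []) : List Int).length + 1)
            q sA).2.Perm
          (satLoop friends (friends.length + 1) (PySem.Set.add PySem.Set.empty q)) :=
        (List.perm_ext_iff_of_nodup hndA hndB).mpr
          (fun x => (houtA x).trans (houtB x).symm)
      have hsort := PySem.List.sorted_eq_sorted_of_perm _ _ (fun x => x)
        (fun _ _ h => h) hperm
      rw [hsort]
      refine ih _ _ _ (fun r hr => hL r (List.mem_cons_of_mem _ hr)) ?_ hinvA
      intro x
      rw [hseenA x, PySem.Set.mem_update, hmem x, houtB x]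

-- ===== VERDICT (by name: the statement is the Claim_ definition above) =====
theorem networking_spec : Claim_equal_networking := by
  unfold Claim_equal_networking
  intro friends sortbylen _
  unfold Spec_networking
  simp only [networking, networking_alt]
  have hpeople : PySem.List.dedup (friends.flatMap (fun g => g)) =
      (PySem.Set.ofList (friends.foldl (· ++ ·) []) : List Int) := by
    rw [PySem.List.dedup_eq_ofList, PySem.List.foldl_append_eq_flatten, List.nil_append]
    congr 1
    exact List.flatMap_id'
  rw [hpeople]
  have h2 := outer_eq friends _ _ _ rfl rfl rfl
    (PySem.Set.ofList (friends.foldl (· ++ ·) []))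
    PySem.Set.empty PySem.Set.empty [] (fun q hq => hq) (fun x => Iff.rfl)
    (fun x y hx _ => absurd hx (List.not_mem_nil))
  rw [h2]
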